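-- pv_equiv track=rewrite | github.com/paiml/depyler | examples/hard_realworld_simulation.py | dice_roll_histogram
-- ===== SOURCE A (Python) =====
-- def lcg_next(seed: int) -> int:
--     """Linear congruential generator. Returns next pseudo-random value."""
--     # Parameters from Numerical Recipes
--     a: int = 1664525
--     c: int = 1013904223
--     m: int = 2147483647
--     return (a * seed + c) % m
--
-- def lcg_range(seed: int, low: int, high: int) -> list[int]:
--     """Generate random value in [low, high] from seed. Returns [value, next_seed]."""
--     next_seed: int = lcg_next(seed)
--     if next_seed < 0:
--         next_seed = 0 - next_seed
--     span: int = high - low + 1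
--     value: int = low + (next_seed % span)
--     return [value, next_seed]
--
-- def dice_roll_histogram(num_rolls: int, seed: int) -> list[int]:
--     """Simulate rolling two dice num_rolls times. Returns histogram of sums (indices 2-12)."""
--     hist: list[int] = []
--     hi: int = 0
--     while hi < 13:
--         hist.append(0)
--         hi = hi + 1
--     current_seed: int = seed
--     idx: int = 0
--     while idx < num_rolls:
--         d1_res: list[int] = lcg_range(current_seed, 1, 6)
--         d1: int = d1_res[0]
--         current_seed = d1_res[1]
--         d2_res: list[int] = lcg_range(current_seed, 1, 6)
--         d2: int = d2_res[0]
--         current_seed = d2_res[1]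
--         total: int = d1 + d2
--         hist[total] = hist[total] + 1
--         idx = idx + 1
--     return hist
-- ===== SOURCE B (Python) =====
-- def sim(n, s, a, c, m):
--     """n >= 1 dice-pair rolls starting from LCG state s. Returns (histogram of
--     the n two-dice totals, coefficients (A, C) of the 2n-step affine jump map
--     x -> (A*x + C) mod m), combining halves by histogram addition and
--     composition of affine maps."""
--     if n == 1:
--         s1 = (a * s + c) % m
--         s2 = (a * s1 + c) % m
--         h = [0] * 13
--         h[2 + s1 % 6 + s2 % 6] = 1
--         return h, a * a % m, (a * c + c) % m
--     k = n // 2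
--     h1, A1, C1 = sim(k, s, a, c, m)
--     h2, A2, C2 = sim(n - k, (A1 * s + C1) % m, a, c, m)
--     for j in range(13):
--         h1[j] += h2[j]
--     return h1, A2 * A1 % m, (A2 * C1 + C2) % m
--
-- def dice_roll_histogram(num_rolls: int, seed: int) -> list[int]:
--     """Divide-and-conquer: split the rolls in half, jump the seed over the left
--     half with the composed affine map, and add the two sub-histograms."""
--     if num_rolls <= 0:
--         return [0] * 13
--     return sim(num_rolls, seed, 1664525, 1013904223, 2147483647)[0]
-- ===== Notes on version B (the rewrite author's own statement) =====
-- stated objective: alternative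
-- what changed: Replaces A's sequential generate-and-tally loop by a divide-and-conquer recursion: the rolls are split in half, each half returns its own histogram plus the affine jump map (A, C) of its 2n LCG steps, and the parent jumps the seed over the left half by one composed affine map and adds the two sub-histograms pointwise.
import Mathlib
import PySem

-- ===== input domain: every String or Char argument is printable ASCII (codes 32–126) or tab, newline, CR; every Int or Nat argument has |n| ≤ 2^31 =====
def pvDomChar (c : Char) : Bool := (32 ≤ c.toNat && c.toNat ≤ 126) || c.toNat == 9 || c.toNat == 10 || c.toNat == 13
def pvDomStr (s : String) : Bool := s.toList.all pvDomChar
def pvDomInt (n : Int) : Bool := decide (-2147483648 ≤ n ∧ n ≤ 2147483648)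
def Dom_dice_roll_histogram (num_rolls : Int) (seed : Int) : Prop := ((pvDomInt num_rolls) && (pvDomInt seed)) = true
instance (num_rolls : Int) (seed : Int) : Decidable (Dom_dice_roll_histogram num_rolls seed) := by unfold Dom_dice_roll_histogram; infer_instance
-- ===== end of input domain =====

-- B replaces A's sequential generate-and-tally loop by a divide-and-conquer recursion:
-- each half of the rolls returns its histogram plus the affine jump map of its LCG steps;
-- the parent jumps the seed over the left half and adds the two sub-histograms.

-- ===== PORT A =====
def lcg_next (seed : Int) : Int :=
  PySem.Int.mod (1664525 * seed + 1013904223) 2147483647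

def lcg_range (seed low high : Int) : List Int :=
  let next_seed := lcg_next seed
  let next_seed := if next_seed < 0 then 0 - next_seed else next_seed
  let span := high - low + 1
  let value := low + PySem.Int.mod next_seed span
  [value, next_seed]

-- the first 'while' of A: append 0 thirteen times
def buildZerosA : Nat → List Int → List Int
  | 0, hist => hist
  | n + 1, hist => buildZerosA n (hist ++ [0])

-- the second 'while' of A (fuel = number of remaining iterations)
def diceLoopA : Nat → Int → List Int → List Int
  | 0, _, hist => hist
  | n + 1, current_seed, hist =>
      let d1_res := lcg_range current_seed 1 6
      let d1 := PySem.List.pyGetD d1_res 0 0        -- index always in range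
      let cs1 := PySem.List.pyGetD d1_res 1 0
      let d2_res := lcg_range cs1 1 6
      let d2 := PySem.List.pyGetD d2_res 0 0
      let cs2 := PySem.List.pyGetD d2_res 1 0
      let total := d1 + d2
      let hist' := PySem.List.pySetD hist total (PySem.List.pyGetD hist total 0 + 1)  -- total ∈ [2,12], always in range
      diceLoopA n cs2 hist'

def dice_roll_histogram (num_rolls : Int) (seed : Int) : List Int :=
  diceLoopA num_rolls.toNat seed (buildZerosA 13 [])

-- ===== PORT B =====
-- Source B's sim: n ≥ 1 rolls from state s; returns (histogram, A, C) where x -> (A*x+C) mod m'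
-- is the composed affine jump map of the 2n LCG steps.  The n = 0 branch is only a
-- totality guard: Source B never calls sim with n < 1.
def simB (n : Nat) (s a c m' : Int) : List Int × Int × Int :=
  if n = 0 then (List.replicate 13 0, 1, 0)   -- unreachable totality guard
  else if n = 1 then
    let s1 := PySem.Int.mod (a * s + c) m'
    let s2 := PySem.Int.mod (a * s1 + c) m'
    let h := PySem.List.pySetD (List.replicate 13 (0 : Int)) (2 + PySem.Int.mod s1 6 + PySem.Int.mod s2 6) 1
    (h, PySem.Int.mod (a * a) m', PySem.Int.mod (a * c + c) m')
  else
    let k := n / 2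
    let r1 := simB k s a c m'
    let r2 := simB (n - k) (PySem.Int.mod (r1.2.1 * s + r1.2.2) m') a c m'
    let h := (PySem.List.pyRange 0 13 1).foldl
      (fun h j => PySem.List.pySetD h j (PySem.List.pyGetD h j 0 + PySem.List.pyGetD r2.1 j 0)) r1.1
    (h, PySem.Int.mod (r2.2.1 * r1.2.1) m', PySem.Int.mod (r2.2.1 * r1.2.2 + r2.2.2) m')
termination_by n
decreasing_by all_goals omega

def dice_roll_histogram_alt (num_rolls : Int) (seed : Int) : List Int :=
  if num_rolls ≤ 0 then List.replicate 13 0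
  else (simB num_rolls.toNat seed 1664525 1013904223 2147483647).1

-- ===== PRECONDITION & SPEC =====
def Spec_dice_roll_histogram (num_rolls : Int) (seed : Int) (out : List Int) : Prop := out = dice_roll_histogram_alt num_rolls seed
instance (num_rolls : Int) (seed : Int) (out : List Int) : Decidable (Spec_dice_roll_histogram num_rolls seed out) := by unfold Spec_dice_roll_histogram; infer_instance

-- ===== CLAIM (what is proved, stated in full; the proofs are below) =====
def Claim_equal_dice_roll_histogram : Prop := ∀ (num_rolls : Int) (seed : Int), Dom_dice_roll_histogram num_rolls seed → Spec_dice_roll_histogram num_rolls seed (dice_roll_histogram num_rolls seed)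

-- ===== LEMMAS AND PROOFS =====

-- the LCG iterate as A computes it (reduced mod m at every step)
def lcgIter : Nat → Int → Int
  | 0, x => x
  | k + 1, x => PySem.Int.mod (1664525 * lcgIter k x + 1013904223) 2147483647

-- A's histogram update and the total of the roll starting at state s
def upd (h : List Int) (t : Int) : List Int :=
  PySem.List.pySetD h t (PySem.List.pyGetD h t 0 + 1)

def tot (s : Int) : Int :=
  1 + PySem.Int.mod (lcgIter 1 s) 6 + (1 + PySem.Int.mod (lcgIter 2 s) 6)

theorem modM (x : Int) : PySem.Int.mod x 2147483647 = x % 2147483647 :=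
  PySem.Int.mod_eq_emod_of_pos (by norm_num)

-- mod juggling over a fixed modulus
theorem emod_absorb (p q x m : Int) :
    ((p % m) * x + q % m) % m = (p * x + q) % m := by
  conv_lhs => rw [Int.add_emod, Int.mul_emod, Int.emod_emod_of_dvd _ dvd_rfl,
                  Int.emod_emod_of_dvd _ dvd_rfl]
  conv_rhs => rw [Int.add_emod, Int.mul_emod]

theorem emod_absorb_mid (A y C m : Int) :
    (A * (y % m) + C) % m = (A * y + C) % m := by
  conv_lhs => rw [Int.add_emod, Int.mul_emod, Int.emod_emod_of_dvd _ dvd_rfl]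
  conv_rhs => rw [Int.add_emod, Int.mul_emod]

theorem lcgIter_add (i j : Nat) (x : Int) : lcgIter (i + j) x = lcgIter i (lcgIter j x) := by
  induction i with
  | zero => simp [lcgIter]
  | succ i ih => simp [lcgIter, Nat.succ_add, ih]

theorem getPair0 (a b : Int) : PySem.List.pyGetD [a, b] 0 0 = a := rfl

theorem getPair1 (a b : Int) : PySem.List.pyGetD [a, b] 1 0 = b := rfl

-- the abs branch in lcg_range never fires and the pair indexing collapses
theorem lcg_range_eq (s : Int) :
    lcg_range s 1 6 =
      [1 + PySem.Int.mod (PySem.Int.mod (1664525 * s + 1013904223) 2147483647) 6,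
       PySem.Int.mod (1664525 * s + 1013904223) 2147483647] := by
  have h : ¬ (1664525 * s + 1013904223) % 2147483647 < 0 := by
    have := Int.emod_nonneg (1664525 * s + 1013904223) (by norm_num : (2147483647 : Int) ≠ 0)
    omega
  simp [lcg_range, lcg_next, PySem.Int.mod_eq_emod_of_pos, h]

theorem buildZerosA_13 : buildZerosA 13 [] = List.replicate 13 0 := by decide

-- A's loop does one roll, then continues from the advanced state
theorem stepA (r : Nat) (s : Int) (h : List Int) :
    diceLoopA (r + 1) s h = diceLoopA r (lcgIter 2 s) (upd h (tot s)) := by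
  simp only [diceLoopA, lcg_range_eq, getPair0, getPair1, upd, tot, lcgIter]

theorem tot_bounds (s : Int) : 2 ≤ tot s ∧ tot s ≤ 12 := by
  have h1 := PySem.Int.mod_nonneg (lcgIter 1 s) (by norm_num : (0:Int) < 6)
  have h2 := PySem.Int.mod_lt (lcgIter 1 s) (by norm_num : (0:Int) < 6)
  have h3 := PySem.Int.mod_nonneg (lcgIter 2 s) (by norm_num : (0:Int) < 6)
  have h4 := PySem.Int.mod_lt (lcgIter 2 s) (by norm_num : (0:Int) < 6)
  unfold tot; omega

theorem length_upd (h : List Int) (t : Int) : (upd h t).length = h.length := by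
  simp [upd, PySem.List.length_pySetD]

theorem length_diceLoopA (n : Nat) : ∀ (s : Int) (h : List Int),
    (diceLoopA n s h).length = h.length := by
  induction n with
  | zero => intro s h; rfl
  | succ n ih => intro s h; rw [stepA, ih, length_upd]

-- splitting A's loop at an arbitrary point
theorem diceLoopA_split (p q : Nat) : ∀ (s : Int) (h : List Int),
    diceLoopA (p + q) s h = diceLoopA q (lcgIter (2 * p) s) (diceLoopA p s h) := by
  induction p with
  | zero => intro s h; simp [lcgIter, diceLoopA]
  | succ p ih =>
    intro s h
    have e : p + 1 + q = (p + q) + 1 := by omega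
    rw [e, stepA, stepA, ih]
    have e2 : 2 * (p + 1) = 2 * p + 2 := by omega
    rw [e2, lcgIter_add]

theorem zip_add_zero (h : List Int) (hh : h.length = 13) :
    List.zipWith (· + ·) h (List.replicate 13 (0 : Int)) = h := by
  apply List.ext_getElem
  · simp [hh]
  · intro j hj1 hj2
    simp only [List.getElem_zipWith, List.getElem_replicate, Int.add_zero]

theorem getZeros (t : Int) (h0 : 0 ≤ t) (ht : t < 13) :
    PySem.List.pyGetD (List.replicate 13 (0 : Int)) t 0 = 0 := by
  have htn : t.toNat < 13 := by omega
  rw [PySem.List.pyGetD_of_nonneg _ _ h0, List.getD_eq_getElem _ 0 (by simpa using htn)]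
  exact List.getElem_replicate _

-- updating index t then adding D = adding (the unit histogram at t) pointwise
theorem zip_upd (t : Int) (h D : List Int) (hh : h.length = 13) (hD : D.length = 13)
    (ht2 : 2 ≤ t) (ht12 : t ≤ 12) :
    List.zipWith (· + ·) (upd h t) D
      = List.zipWith (· + ·) h (List.zipWith (· + ·) (upd (List.replicate 13 0) t) D) := by
  have h0 : (0 : Int) ≤ t := by omega
  have htn : t.toNat < 13 := by omega
  rw [upd, upd, PySem.List.pySetD_of_nonneg _ _ h0, PySem.List.pySetD_of_nonneg _ _ h0,
      getZeros t h0 (by omega)]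
  have hgh : PySem.List.pyGetD h t 0 = h[t.toNat]'(by omega) := by
    rw [PySem.List.pyGetD_of_nonneg _ _ h0, List.getD_eq_getElem h 0 (by omega)]
  apply List.ext_getElem
  · simp [hh, hD]
  · intro j hj1 hj2
    have hj13 : j < 13 := by simp [hh, hD] at hj1; omega
    simp only [List.getElem_zipWith, hgh, List.getElem_set,
               List.getElem_replicate]
    by_cases hjt : t.toNat = j
    · subst hjt; simp; omega
    · simp [hjt]

-- A's tally over any 13-histogram = that histogram + the tally over zeros
theorem diceLoopA_shift (q : Nat) : ∀ (s : Int) (h : List Int), h.length = 13 →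
    diceLoopA q s h = List.zipWith (· + ·) h (diceLoopA q s (List.replicate 13 0)) := by
  induction q with
  | zero =>
    intro s h hh
    simp only [diceLoopA]
    exact (zip_add_zero h hh).symm
  | succ q ih =>
    intro s h hh
    rw [stepA, stepA]
    rw [ih (lcgIter 2 s) (upd h (tot s)) (by rw [length_upd, hh])]
    rw [ih (lcgIter 2 s) (upd (List.replicate 13 0) (tot s)) (by rw [length_upd]; simp)]
    exact zip_upd (tot s) h (diceLoopA q (lcgIter 2 s) (List.replicate 13 0)) hh
      (by rw [length_diceLoopA]; simp) (tot_bounds s).1 (tot_bounds s).2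

-- Source B's in-place merge loop over range(13) is pointwise addition
set_option maxHeartbeats 2000000 in
theorem merge13 (h1 h2 : List Int) (l1 : h1.length = 13) (l2 : h2.length = 13) :
    (PySem.List.pyRange 0 13 1).foldl
        (fun h j => PySem.List.pySetD h j (PySem.List.pyGetD h j 0 + PySem.List.pyGetD h2 j 0)) h1
      = List.zipWith (· + ·) h1 h2 := by
  have hr : PySem.List.pyRange 0 13 1 = [0,1,2,3,4,5,6,7,8,9,10,11,12] := by decide
  rw [hr]
  match h1, l1 with
  | [a0,a1,a2,a3,a4,a5,a6,a7,a8,a9,a10,a11,a12], _ =>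
  match h2, l2 with
  | [b0,b1,b2,b3,b4,b5,b6,b7,b8,b9,b10,b11,b12], _ =>
    simp [PySem.List.pySetD_of_nonneg, PySem.List.pyGetD_of_nonneg]

-- the main invariant of Source B's sim: histogram = A's tally from zeros; the returned
-- affine map applied to this node's own state jumps it over all 2n LCG steps
theorem simB_spec (n : Nat) : 1 ≤ n → ∀ s : Int,
    (simB n s 1664525 1013904223 2147483647).1 = diceLoopA n s (List.replicate 13 0)
    ∧ PySem.Int.mod ((simB n s 1664525 1013904223 2147483647).2.1 * s
        + (simB n s 1664525 1013904223 2147483647).2.2) 2147483647 = lcgIter (2 * n) s := by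
  induction n using Nat.strong_induction_on with
  | _ n ih =>
    intro hn s
    by_cases h1 : n = 1
    · subst h1
      have e1 : PySem.Int.mod (1664525 * s + 1013904223) 2147483647 = lcgIter 1 s := rfl
      have e2 : PySem.Int.mod (1664525 * PySem.Int.mod (1664525 * s + 1013904223) 2147483647
          + 1013904223) 2147483647 = lcgIter 2 s := rfl
      rw [simB, if_neg (by omega : (1:Nat) ≠ 0), if_pos rfl]
      constructor
      · -- histogram of the single roll
        simp only []
        have e2' : PySem.Int.mod (1664525 * lcgIter 1 s + 1013904223) 2147483647
            = lcgIter 2 s := rfl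
        rw [e1, e2', show (1 : Nat) = 0 + 1 from rfl, stepA]
        simp only [diceLoopA, upd]
        rw [getZeros (tot s) (by have := tot_bounds s; omega) (by have := tot_bounds s; omega),
            zero_add]
        rw [show (2 : Int) + PySem.Int.mod (lcgIter 1 s) 6 + PySem.Int.mod (lcgIter 2 s) 6
              = 1 + PySem.Int.mod (lcgIter 1 s) 6 + (1 + PySem.Int.mod (lcgIter 2 s) 6) from by ring]
        rfl
      · -- jump map of the single roll (2 LCG steps)
        simp only []
        rw [modM, modM, modM, emod_absorb]
        have h2 : lcgIter 2 s = (1664525 * ((1664525 * s + 1013904223) % 2147483647)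
            + 1013904223) % 2147483647 := by
          simp only [lcgIter, modM]
        rw [show (2 : Nat) * 1 = 2 from rfl, h2, emod_absorb_mid]
        congr 1
        ring
    · -- n ≥ 2: split into n/2 and n - n/2
      have h0 : n ≠ 0 := by omega
      obtain ⟨ihL1, ihL2⟩ := ih (n / 2) (by omega) (by omega) s
      set s' := PySem.Int.mod ((simB (n / 2) s 1664525 1013904223 2147483647).2.1 * s
          + (simB (n / 2) s 1664525 1013904223 2147483647).2.2) 2147483647 with hs'
      obtain ⟨ihR1, ihR2⟩ := ih (n - n / 2) (by omega) (by omega) s'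
      have L1 : (simB (n / 2) s 1664525 1013904223 2147483647).1.length = 13 := by
        rw [ihL1]; simp [length_diceLoopA]
      have L2 : (simB (n - n / 2) s' 1664525 1013904223 2147483647).1.length = 13 := by
        rw [ihR1]; simp [length_diceLoopA]
      rw [simB, if_neg h0, if_neg h1]
      constructor
      · -- histograms add
        simp only []
        rw [← hs', merge13 _ _ L1 L2, ihL1, ihR1, ihL2]
        conv_rhs => rw [show n = n / 2 + (n - n / 2) from by omega, diceLoopA_split]
        rw [diceLoopA_shift (n - n / 2) (lcgIter (2 * (n / 2)) s)
              (diceLoopA (n / 2) s (List.replicate 13 0)) (by simp [length_diceLoopA])]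
      · -- jump maps compose
        simp only []
        rw [← hs', modM, modM, modM, emod_absorb]
        rw [show (simB (n - n / 2) s' 1664525 1013904223 2147483647).2.1
              * (simB (n / 2) s 1664525 1013904223 2147483647).2.1 * s
              + ((simB (n - n / 2) s' 1664525 1013904223 2147483647).2.1
                  * (simB (n / 2) s 1664525 1013904223 2147483647).2.2
                + (simB (n - n / 2) s' 1664525 1013904223 2147483647).2.2)
            = (simB (n - n / 2) s' 1664525 1013904223 2147483647).2.1
              * ((simB (n / 2) s 1664525 1013904223 2147483647).2.1 * s
                + (simB (n / 2) s 1664525 1013904223 2147483647).2.2)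
              + (simB (n - n / 2) s' 1664525 1013904223 2147483647).2.2 from by ring]
        rw [← emod_absorb_mid, ← modM ((simB (n / 2) s 1664525 1013904223 2147483647).2.1 * s
            + (simB (n / 2) s 1664525 1013904223 2147483647).2.2), ← hs']
        rw [← modM, ihR2, ihL2, ← lcgIter_add]
        congr 1
        omega

-- ===== VERDICT (by name: the statement is the Claim_ definition above) =====
theorem dice_roll_histogram_spec : Claim_equal_dice_roll_histogram := by
  intro num_rolls seed _
  show dice_roll_histogram num_rolls seed = dice_roll_histogram_alt num_rolls seed
  rw [dice_roll_histogram, dice_roll_histogram_alt, buildZerosA_13]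
  by_cases h : num_rolls ≤ 0
  · simp [h, Int.toNat_of_nonpos h, diceLoopA]
  · rw [if_neg h, ((simB_spec num_rolls.toNat (by omega) seed).1)]
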